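-- pv_equiv track=rewrite | github.com/reskenazi/Euler | utilities.py | addToSelf
-- ===== SOURCE A (Python) =====
-- def addToSelf(x):
--   result = []
--   carry = 0
--   for i in range(len(x)-1, -1, -1):
--     sum = int(x[i]) + int(x[i])
--     result.insert(0, str((sum % 10) + carry))
--     carry = sum // 10
--   if(carry != 0):
--     result.insert(0, str(carry))
--   return result
-- ===== SOURCE B (Python) =====
-- def addToSelf(x):
--     doubled = [2 * int(v) for v in x]
--     if not doubled:
--         return []
--     result = []
--     lead = doubled[0] // 10
--     if lead != 0:
--         result.append(str(lead))
--     n = len(doubled)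
--     for i in range(n):
--         result.append(str(doubled[i] % 10 + (doubled[i + 1] // 10 if i + 1 < n else 0)))
--     return result
-- ===== Notes on version B (the rewrite author's own statement) =====
-- stated objective: faster
-- what changed: Replaces A's backward loop with a running carry and result.insert(0, ...) (each insert is O(n)) by a forward pass that appends each digit computed from a local two-element window of the precomputed doubled list, with the leading carry emitted first.
import Mathlib
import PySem

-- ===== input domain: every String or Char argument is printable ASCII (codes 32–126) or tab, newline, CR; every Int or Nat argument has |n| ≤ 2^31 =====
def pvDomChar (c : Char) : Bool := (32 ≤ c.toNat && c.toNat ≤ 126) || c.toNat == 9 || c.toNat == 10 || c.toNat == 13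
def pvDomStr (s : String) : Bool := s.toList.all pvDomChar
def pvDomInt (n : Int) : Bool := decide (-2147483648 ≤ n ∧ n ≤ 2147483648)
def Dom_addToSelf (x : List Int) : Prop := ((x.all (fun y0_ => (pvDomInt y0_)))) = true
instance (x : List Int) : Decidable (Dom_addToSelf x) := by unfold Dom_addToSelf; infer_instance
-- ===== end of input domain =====

-- B builds the result in forward order, each digit from a local two-element window of the
-- doubled list, replacing A's backward loop with its running carry and result.insert(0, ...).

-- ===== PORT A =====
-- literal port of A: backward index loop, running carry, prepend to result.
-- pyGetD with default 0 is exact here: every index the range produces is in bounds.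
def addToSelf (x : List Int) : List String :=
  let st := (PySem.List.pyRange ((x.length : Int) - 1) (-1) (-1)).foldl
    (fun (p : List String × Int) i =>
      let s : Int := PySem.List.pyGetD x i 0 + PySem.List.pyGetD x i 0
      (PySem.Int.toStr (PySem.Int.mod s 10 + p.2) :: p.1, PySem.Int.floordiv s 10))
    ([], 0)
  if st.2 ≠ 0 then PySem.Int.toStr st.2 :: st.1 else st.1

-- ===== PORT B =====
-- literal port of B: double first, optional leading digit, then a forward loop appending
-- str(doubled[i] % 10 + (doubled[i+1] // 10 if i+1 < n else 0)).
def addToSelf_alt (x : List Int) : List String :=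
  match x.map (fun v => 2 * v) with
  | [] => []
  | d0 :: ds =>
    let lead := PySem.Int.floordiv d0 10
    let init := if lead ≠ 0 then [PySem.Int.toStr lead] else []
    (PySem.List.pyRange 0 (((d0 :: ds).length : Int)) 1).foldl
      (fun acc i =>
        acc ++ [PySem.Int.toStr (PySem.Int.mod (PySem.List.pyGetD (d0 :: ds) i 0) 10 +
          (if i + 1 < (((d0 :: ds).length : Int)) then
            PySem.Int.floordiv (PySem.List.pyGetD (d0 :: ds) (i + 1) 0) 10 else 0))])
      init

-- ===== PRECONDITION & SPEC =====
def Spec_addToSelf (x : List Int) (out : List String) : Prop := out = addToSelf_alt x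
instance (x : List Int) (out : List String) : Decidable (Spec_addToSelf x out) := by unfold Spec_addToSelf; infer_instance

-- ===== CLAIM (what is proved, stated in full; the proofs are below) =====
def Claim_equal_addToSelf : Prop := ∀ (x : List Int), Dom_addToSelf x → Spec_addToSelf x (addToSelf x)

-- ===== LEMMAS AND PROOFS =====

-- common reference: (digit list, leading carry) by front recursion over x
def pvCore : List Int → List String × Int
  | [] => ([], (0 : Int))
  | a :: rest =>
    let p := pvCore rest
    (PySem.Int.toStr (PySem.Int.mod (a + a) 10 + p.2) :: p.1, PySem.Int.floordiv (a + a) 10)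

theorem pvCore_snd (a : Int) (rest : List Int) :
    (pvCore (a :: rest)).2 = PySem.Int.floordiv (a + a) 10 := rfl

theorem pvGetD_double (x : List Int) (k : Nat) :
    (x.map (fun v => 2 * v)).getD k 0 = 2 * x.getD k 0 := by
  induction x generalizing k with
  | nil => simp [List.getD]
  | cons a t ih =>
    cases k with
    | zero => simp
    | succ m => simpa using ih m

theorem pvCoreA_range (x : List Int) :
    (List.range x.length).foldr
      (fun k (p : List String × Int) =>
        (PySem.Int.toStr (PySem.Int.mod (x.getD k 0 + x.getD k 0) 10 + p.2) :: p.1,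
         PySem.Int.floordiv (x.getD k 0 + x.getD k 0) 10))
      ([], 0) = pvCore x := by
  induction x with
  | nil => rfl
  | cons a rest ih =>
    rw [List.length_cons, List.range_succ_eq_map, List.foldr_cons, List.foldr_map]
    simp only [Nat.succ_eq_add_one, List.getD_cons_succ, List.getD_cons_zero]
    rw [ih]
    rfl

theorem pvFoldA_eq_core (x : List Int) :
    (PySem.List.pyRange ((x.length : Int) - 1) (-1) (-1)).foldl
      (fun (p : List String × Int) i =>
        let s : Int := PySem.List.pyGetD x i 0 + PySem.List.pyGetD x i 0
        (PySem.Int.toStr (PySem.Int.mod s 10 + p.2) :: p.1, PySem.Int.floordiv s 10))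
      ([], 0) = pvCore x := by
  show (PySem.List.pyRange ((x.length : Int) - 1) (-1) (-1)).foldl
      (fun (p : List String × Int) i =>
        (PySem.Int.toStr (PySem.Int.mod (PySem.List.pyGetD x i 0 + PySem.List.pyGetD x i 0) 10 + p.2) :: p.1,
         PySem.Int.floordiv (PySem.List.pyGetD x i 0 + PySem.List.pyGetD x i 0) 10))
      ([], 0) = pvCore x
  rw [show PySem.List.pyRange ((x.length : Int) - 1) (-1) (-1)
        = (PySem.List.pyRange 0 (x.length : Int) 1).reverse by
      rw [PySem.List.pyRange_neg_one_eq_reverse]; norm_num]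
  rw [List.foldl_reverse]
  rw [show PySem.List.pyRange 0 (x.length : Int) 1
        = (List.range x.length).map (fun k => ((k : Nat) : Int)) by
      rw [PySem.List.pyRange_one]; simp]
  rw [List.foldr_map]
  simp only [PySem.List.pyGetD_natCast]
  exact pvCoreA_range x

theorem pvCoreB_range (x : List Int) :
    (List.range x.length).map (fun k =>
      PySem.Int.toStr (PySem.Int.mod (2 * x.getD k 0) 10 +
        (if k + 1 < x.length then PySem.Int.floordiv (2 * x.getD (k + 1) 0) 10 else 0)))
      = (pvCore x).1 := by
  induction x with
  | nil => rfl
  | cons a rest ih =>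
    rw [List.length_cons, List.range_succ_eq_map, List.map_cons, List.map_map]
    have htail : (List.range rest.length).map
        ((fun k => PySem.Int.toStr (PySem.Int.mod (2 * (a :: rest).getD k 0) 10 +
          (if k + 1 < rest.length + 1 then
            PySem.Int.floordiv (2 * (a :: rest).getD (k + 1) 0) 10 else 0))) ∘ Nat.succ)
        = (pvCore rest).1 := by
      rw [← ih]
      apply List.map_congr_left
      intro k _
      simp only [Function.comp, Nat.succ_eq_add_one, List.getD_cons_succ,
        Nat.add_lt_add_iff_right]
    rw [htail]
    rcases rest with _ | ⟨b, t⟩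
    · simp [pvCore, two_mul]
    · simp only [List.getD_cons_zero, List.getD_cons_succ]
      have hc : (0 + 1 < (b :: t).length + 1) = True := by simp
      simp only [hc, if_true]
      show _ :: _ = (pvCore (a :: b :: t)).1
      simp [pvCore, two_mul]
    
theorem pvFoldB_eq_core (x : List Int) (init : List String) :
    (PySem.List.pyRange 0 (((x.map (fun v => 2 * v)).length : Int)) 1).foldl
      (fun acc i =>
        acc ++ [PySem.Int.toStr (PySem.Int.mod (PySem.List.pyGetD (x.map (fun v => 2 * v)) i 0) 10 +
          (if i + 1 < (((x.map (fun v => 2 * v)).length : Int)) then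
            PySem.Int.floordiv (PySem.List.pyGetD (x.map (fun v => 2 * v)) (i + 1) 0) 10 else 0))])
      init = init ++ (pvCore x).1 := by
  rw [PySem.List.foldl_append_singleton_eq_map]
  congr 1
  rw [show PySem.List.pyRange 0 (((x.map (fun v => 2 * v)).length : Int)) 1
        = (List.range x.length).map (fun k => ((k : Nat) : Int)) by
      rw [PySem.List.pyRange_one]; simp]
  rw [List.map_map]
  rw [← pvCoreB_range x]
  apply List.map_congr_left
  intro k hk
  simp only [Function.comp]
  have h1 : ((k : Int) + 1) = ((k + 1 : Nat) : Int) := by push_cast; ring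
  rw [h1, PySem.List.pyGetD_natCast, PySem.List.pyGetD_natCast]
  have h2 : (((k + 1 : Nat) : Int) < ((x.map (fun v => 2 * v)).length : Int)) ↔ (k + 1 < x.length) := by
    rw [List.length_map]; exact_mod_cast Iff.rfl
  simp only [h2, pvGetD_double]

-- ===== VERDICT (by name: the statement is the Claim_ definition above) =====
theorem addToSelf_spec : Claim_equal_addToSelf := by
  intro x _
  show addToSelf x = addToSelf_alt x
  unfold addToSelf
  rw [pvFoldA_eq_core]
  rcases x with _ | ⟨a, rest⟩
  · rfl
  · show _ = addToSelf_alt (a :: rest)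
    unfold addToSelf_alt
    simp only [List.map_cons]
    rw [show ((2 * a) :: rest.map (fun v => 2 * v)) = (a :: rest).map (fun v => 2 * v) by simp]
    rw [pvFoldB_eq_core (a :: rest)]
    rw [pvCore_snd]
    have hl : PySem.Int.floordiv (2 * a) 10 = PySem.Int.floordiv (a + a) 10 := by rw [two_mul]
    rw [hl]
    split_ifs with h
    · rfl
    · simp
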